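-- pv_equiv track=rewrite | github.com/LeoAda/Cipher-text-using-MCMC | zola assomoir.py | generate_occurence_matrix
-- ===== SOURCE A (Python) =====
-- def generate_occurence_matrix(list_of_letter):
--     occurence_matrix = { i : {} for i in list_of_letter }
--
--
--     for i in range(0, len(list_of_letter) - 1):
--             if(list_of_letter[i+1] in occurence_matrix[list_of_letter[i]]):
--                 occurence_matrix[list_of_letter[i]][list_of_letter[i+1]] += 1
--             else:
--                 occurence_matrix[list_of_letter[i]][list_of_letter[i+1]] = 1
--
--     return occurence_matrix
-- ===== SOURCE B (Python) =====
-- def generate_occurence_matrix(list_of_letter):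
--     # Phase 1: flat bigram count over adjacent pairs.
--     pair_counts = {}
--     for pair in zip(list_of_letter, list_of_letter[1:]):
--         pair_counts[pair] = pair_counts.get(pair, 0) + 1
--     # Phase 2: seed every distinct letter, then reshape the flat table.
--     occurence_matrix = {letter: {} for letter in list_of_letter}
--     for (first, second), count in pair_counts.items():
--         occurence_matrix[first][second] = count
--     return occurence_matrix
-- ===== Notes on version B (the rewrite author's own statement) =====
-- stated objective: alternative
-- what changed: A builds the nested dict in one interleaved index loop that increments occurence_matrix[l[i]][l[i+1]] per step; B first counts all adjacent pairs into a flat bigram table (dict keyed by (first, second)), then seeds {letter: {}} and distributes the finished counts into the nested dict in a second pass.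
import Mathlib
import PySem

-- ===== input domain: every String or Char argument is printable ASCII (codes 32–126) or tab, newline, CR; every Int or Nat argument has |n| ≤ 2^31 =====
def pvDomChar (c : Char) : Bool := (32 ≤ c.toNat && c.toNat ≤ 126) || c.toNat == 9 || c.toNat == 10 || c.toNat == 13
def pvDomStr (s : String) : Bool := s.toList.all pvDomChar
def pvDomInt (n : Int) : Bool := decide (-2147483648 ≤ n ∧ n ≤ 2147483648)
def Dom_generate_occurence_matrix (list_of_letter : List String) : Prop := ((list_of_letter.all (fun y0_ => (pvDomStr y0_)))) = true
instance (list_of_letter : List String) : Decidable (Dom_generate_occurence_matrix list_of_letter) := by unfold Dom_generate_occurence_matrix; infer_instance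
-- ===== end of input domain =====

-- B replaces A's single interleaved index loop by a two-phase count-then-reshape
-- (flat bigram table first, then distribute counts into the pre-seeded nested dict);
-- same return value, alternative decomposition (no speed claim).


-- ===== PORT A =====
-- A's nested dict is Dict String (Dict String Int); the final conversion of inner
-- dicts to their items lists is the type convention for dict-of-dicts.
-- list indices i and i+1 are always in range (i < len-1) and list_of_letter[i] is always
-- a key of the outer dict (every element was seeded), so the pyGetD/getD defaults are
-- never used; the in-place mutation of the inner dict is Dict.modify at the outer key.
def generate_occurence_matrix (list_of_letter : List String) : List (String × List (String × Int)) :=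
  let om0 : PySem.Dict String (PySem.Dict String Int) :=
    list_of_letter.foldl (fun d i => d.insert i PySem.Dict.empty) PySem.Dict.empty
  let om := (PySem.List.pyRange 0 ((list_of_letter.length : Int) - 1)).foldl
    (fun d i =>
      if (d.getD (PySem.List.pyGetD list_of_letter i "") PySem.Dict.empty).contains
           (PySem.List.pyGetD list_of_letter (i + 1) "") then
        d.modify (PySem.List.pyGetD list_of_letter i "") PySem.Dict.empty
          (fun inn => inn.insert (PySem.List.pyGetD list_of_letter (i + 1) "")
            (inn.getD (PySem.List.pyGetD list_of_letter (i + 1) "") 0 + 1))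
      else
        d.modify (PySem.List.pyGetD list_of_letter i "") PySem.Dict.empty
          (fun inn => inn.insert (PySem.List.pyGetD list_of_letter (i + 1) "") 1))
    om0
  om.items.map (fun p => (p.1, p.2.items))

-- ===== PORT B =====
-- phase 1: flat bigram counter over zip(l, l[1:]); phase 2: seed {letter: {}},
-- then assign each counted pair into the nested dict.
def generate_occurence_matrix_alt (list_of_letter : List String) : List (String × List (String × Int)) :=
  let pairs := list_of_letter.zip (PySem.List.slice list_of_letter (some 1) none)
  let pair_counts : PySem.Dict (String × String) Int :=
    pairs.foldl (fun d p => d.insert p (d.getD p 0 + 1)) PySem.Dict.empty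
  let om0 : PySem.Dict String (PySem.Dict String Int) :=
    list_of_letter.foldl (fun d x => d.insert x PySem.Dict.empty) PySem.Dict.empty
  let om := pair_counts.items.foldl
    (fun d it => d.modify it.1.1 PySem.Dict.empty (fun inn => inn.insert it.1.2 it.2)) om0
  om.items.map (fun p => (p.1, p.2.items))

-- ===== PRECONDITION & SPEC =====
def Spec_generate_occurence_matrix (list_of_letter : List String) (out : List (String × List (String × Int))) : Prop := out = generate_occurence_matrix_alt list_of_letter
instance (list_of_letter : List String) (out : List (String × List (String × Int))) : Decidable (Spec_generate_occurence_matrix list_of_letter out) := by unfold Spec_generate_occurence_matrix; infer_instance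

-- ===== CLAIM (what is proved, stated in full; the proofs are below) =====
def Claim_equal_generate_occurence_matrix : Prop := ∀ (list_of_letter : List String), Dom_generate_occurence_matrix list_of_letter → Spec_generate_occurence_matrix list_of_letter (generate_occurence_matrix list_of_letter)

-- ===== LEMMAS AND PROOFS =====

def pvCounterStep (inn : PySem.Dict String Int) (b : String) : PySem.Dict String Int :=
  inn.insert b (inn.getD b 0 + 1)

theorem pvBranchMerge (d : PySem.Dict String (PySem.Dict String Int)) (a b : String) :
    (if (d.getD a PySem.Dict.empty).contains b then
       d.modify a PySem.Dict.empty (fun inn => inn.insert b (inn.getD b 0 + 1))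
     else
       d.modify a PySem.Dict.empty (fun inn => inn.insert b 1)) =
    d.modify a PySem.Dict.empty (fun inn => pvCounterStep inn b) := by
  by_cases h : (d.getD a PySem.Dict.empty).contains b = true
  · simp [h, pvCounterStep, PySem.Dict.modify]
  · simp only [Bool.not_eq_true] at h
    simp [h, pvCounterStep, PySem.Dict.modify,
      PySem.Dict.getD_of_not_contains _ _ h]

theorem pvGetD_foldl_modify {β : Type} (L : List β) (key : β → String)
    (upd : β → PySem.Dict String Int → PySem.Dict String Int)
    (d : PySem.Dict String (PySem.Dict String Int)) (c : String) :
    (L.foldl (fun d it => d.modify (key it) PySem.Dict.empty (upd it)) d).getD c PySem.Dict.empty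
      = (L.filter (fun it => key it == c)).foldl (fun inn it => upd it inn)
          (d.getD c PySem.Dict.empty) := by
  induction L generalizing d with
  | nil => rfl
  | cons p L ih =>
    simp only [List.foldl_cons, List.filter_cons]
    rw [ih]
    by_cases h : key p = c
    · simp [h]
    · have : (key p == c) = false := by simp [h]
      simp [this, PySem.Dict.getD_modify_of_ne _ _ _ (Ne.symm h)]

theorem pvSeed_getD (l : List String) (c : String) :
    ((l.foldl (fun d x => d.insert x PySem.Dict.empty) PySem.Dict.empty : PySem.Dict String (PySem.Dict String Int)).getD c PySem.Dict.empty) = PySem.Dict.empty := by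
  have h : ∀ (d : PySem.Dict String (PySem.Dict String Int)),
      (∀ c, d.getD c PySem.Dict.empty = PySem.Dict.empty) →
      ∀ c, (l.foldl (fun d x => d.insert x PySem.Dict.empty) d).getD c PySem.Dict.empty = PySem.Dict.empty := by
    induction l with
    | nil => intro d hd c; exact hd c
    | cons x l ih =>
      intro d hd c
      simp only [List.foldl_cons]
      exact ih _ (fun c' => by rw [PySem.Dict.getD_insert]; split <;> simp [hd]) c
  exact h _ (fun c => by simp [PySem.Dict.getD_empty]) c

theorem pvSeed_keys (l : List String) :
    ((l.foldl (fun d x => d.insert x PySem.Dict.empty) PySem.Dict.empty : PySem.Dict String (PySem.Dict String Int)).keys) = PySem.Set.ofList l := by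
  rw [PySem.Dict.keys_foldl_insert l (fun _ _ => PySem.Dict.empty), PySem.Dict.keys_empty,
    PySem.Set.update_nil_left]

theorem pvUpdate_of_subset {α : Type} [BEq α] [LawfulBEq α] (s : PySem.Set α) (xs : List α)
    (h : ∀ x ∈ xs, x ∈ s) : s.update xs = s := by
  rw [PySem.Set.update_eq_append_filter]
  have : (PySem.Set.ofList xs).filter (fun y => !s.contains y) = [] := by
    rw [List.filter_eq_nil_iff]
    intro a ha
    have : a ∈ xs := (PySem.Set.mem_ofList xs a).mp ha
    simp only [PySem.Set.contains_iff s a |>.mpr (h a this), Bool.not_true]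
    simp
  rw [this, List.append_nil]

theorem pvOfList_filter {α : Type} [BEq α] [LawfulBEq α] (q : α → Bool) (P : List α) :
    (PySem.Set.ofList P).filter q = PySem.Set.ofList (P.filter q) := by
  induction P with
  | nil => simp [PySem.Set.ofList_nil]
  | cons p P ih =>
    rw [PySem.Set.ofList_cons, List.filter_cons]
    by_cases hq : q p = true
    · rw [if_pos hq, List.filter_cons_of_pos hq, PySem.Set.ofList_cons, ← ih]
      simp only [PySem.Set.discard, List.filter_filter]
      congr 1
      exact List.filter_congr (fun y _ => Bool.and_comm _ _)
    · rw [if_neg hq, List.filter_cons_of_neg (by simp [hq]), ← ih]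
      simp only [PySem.Set.discard, List.filter_filter]
      apply List.filter_congr
      intro y hy
      by_cases hyp : y = p
      · subst hyp; simp [hq]
      · simp [hyp]

theorem pvOfList_map {α β : Type} [BEq α] [LawfulBEq α] [BEq β] [LawfulBEq β]
    (f : α → β) (hf : Function.Injective f) (xs : List α) :
    PySem.Set.ofList (xs.map f) = (PySem.Set.ofList xs).map f := by
  induction xs with
  | nil => simp [PySem.Set.ofList_nil]
  | cons x xs ih =>
    rw [List.map_cons, PySem.Set.ofList_cons, PySem.Set.ofList_cons, ih, List.map_cons]
    congr 1
    simp only [PySem.Set.discard, List.filter_map]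
    congr 1
    apply List.filter_congr
    intro y _
    simp only [Function.comp]
    by_cases hxy : y = x
    · subst hxy; simp
    · have : (f y == f x) = false := by
        simp only [beq_eq_false_iff_ne]; exact fun h => hxy (hf h)
      simp [this, hxy]

theorem pvPairs_eq_map (c : String) (M : List (String × String)) (h : ∀ p ∈ M, p.1 = c) :
    M = (M.map (·.2)).map (fun b => (c, b)) := by
  rw [List.map_map]
  conv_lhs => rw [← List.map_id M]
  apply List.map_congr_left
  intro p hp
  simp [Function.comp, ← h p hp]

theorem pvRange_pairs (l : List String) :
    (List.range (l.length - 1)).map (fun k => (l.getD k "", l.getD (k + 1) ""))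
      = l.zip (l.drop 1) := by
  apply List.ext_getElem
  · simp [List.length_zip]
  · intro i h1 h2
    simp only [List.length_map, List.length_range] at h1
    simp only [List.getElem_map, List.getElem_range, List.getElem_zip, List.getElem_drop]
    have hi1 : i < l.length := by omega
    have hi2 : i + 1 < l.length := by omega
    rw [List.getD_eq_getElem _ _ hi1, List.getD_eq_getElem _ _ hi2]
    have h3 : 1 + i = i + 1 := Nat.add_comm 1 i
    simp only [h3]

-- D = (Set.ofList bs).map (c,·)
theorem pvFilterOfList (P : List (String × String)) (c : String) :
    (PySem.Set.ofList P).filter (fun p => p.1 == c)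
      = ((PySem.Set.ofList ((P.filter (fun p => p.1 == c)).map (·.2))).map (fun b => (c, b)) : List (String × String)) := by
  have h1 : ∀ p ∈ P.filter (fun p => p.1 == c), p.1 = c := by
    intro p hp
    have := List.of_mem_filter hp
    simpa using this
  rw [pvOfList_filter]
  conv_lhs => rw [pvPairs_eq_map c _ h1]
  rw [pvOfList_map _ (fun a b h => by simpa using h)]

theorem pvCountAux (P : List (String × String)) (c b : String) :
    P.count (c, b) = ((P.filter (fun p => p.1 == c)).map (·.2)).count b := by
  have h1 : ∀ p ∈ P.filter (fun p => p.1 == c), p.1 = c := by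
    intro p hp; simpa using List.of_mem_filter hp
  rw [← List.count_filter (p := fun p => p.1 == c) (by simp)]
  conv_lhs => rw [pvPairs_eq_map c _ h1]
  exact List.count_map_of_injective _ _ (fun a b h => by simpa using h) b

theorem pvPerKey (P : List (String × String)) (c : String) :
    (((PySem.Set.ofList P).filter (fun p => p.1 == c)).map
        (fun p => (p.2, (P.count p : Int))))
      = (PySem.Set.ofList ((P.filter (fun p => p.1 == c)).map (·.2))).map
          (fun b => (b, (((P.filter (fun p => p.1 == c)).map (·.2)).count b : Int))) := by
  rw [pvFilterOfList, List.map_map]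
  apply List.map_congr_left
  intro b _
  simp only [Function.comp]
  rw [pvCountAux]

theorem pvInnerEq (P : List (String × String)) (c : String) :
    ((((PySem.Dict.counter P).items.filter (fun it => it.1.1 == c)).foldl
        (fun inn it => inn.insert it.1.2 it.2) PySem.Dict.empty)
      : PySem.Dict String Int)
      = PySem.Dict.counter ((P.filter (fun p => p.1 == c)).map (·.2)) := by
  have hitems : (PySem.Dict.counter P).items.filter (fun it => it.1.1 == c)
      = ((PySem.Set.ofList P).filter (fun p => p.1 == c)).map (fun p => (p, (P.count p : Int))) := by
    rw [PySem.Dict.items_counter, List.filter_map]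
    rfl
  have hD := pvFilterOfList P c
  have hnodup : (((PySem.Dict.counter P).items.filter (fun it => it.1.1 == c)).map (fun it => it.1.2)).Nodup := by
    rw [hitems, List.map_map]
    have h1 : ((fun (it : (String × String) × Int) => it.1.2) ∘ fun p => (p, (P.count p : Int))) = fun (p : String × String) => p.2 := rfl
    rw [h1, hD, List.map_map]
    have h2 : ((fun (p : String × String) => p.2) ∘ fun b => (c, b)) = id := rfl
    rw [h2, List.map_id]
    exact PySem.Set.nodup_ofList _
  have key : ((((PySem.Dict.counter P).items.filter (fun it => it.1.1 == c)).foldl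
        (fun inn it => inn.insert it.1.2 it.2) PySem.Dict.empty) : PySem.Dict String Int).items
      = PySem.Dict.empty.items ++ ((PySem.Dict.counter P).items.filter (fun it => it.1.1 == c)).map (fun it => (it.1.2, it.2)) :=
    PySem.Dict.items_foldl_insert_fresh _ (fun (it : (String × String) × Int) => it.1.2)
      (fun (it : (String × String) × Int) => it.2) _
      (fun a _ => PySem.Dict.contains_empty _) hnodup
  apply PySem.Dict.ext
  rw [key, hitems, List.map_map, PySem.Dict.items_counter]
  have h3 : ((fun (it : (String × String) × Int) => (it.1.2, it.2)) ∘ fun p => (p, (P.count p : Int)))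
      = fun (p : String × String) => (p.2, (P.count p : Int)) := rfl
  rw [h3, pvPerKey]
  simp [PySem.Dict.empty]

theorem pvOuterEq (l : List String) :
    ((l.zip (l.drop 1)).foldl
        (fun d p => d.modify p.1 PySem.Dict.empty (fun inn => pvCounterStep inn p.2))
        (l.foldl (fun d x => d.insert x PySem.Dict.empty) PySem.Dict.empty))
      = ((PySem.Dict.counter (l.zip (l.drop 1))).items.foldl
          (fun d it => d.modify it.1.1 PySem.Dict.empty (fun inn => inn.insert it.1.2 it.2))
          (l.foldl (fun d x => d.insert x PySem.Dict.empty) PySem.Dict.empty)) := by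
  set P : List (String × String) := l.zip (l.drop 1) with hPdef
  set S : PySem.Dict String (PySem.Dict String Int) :=
    l.foldl (fun d x => d.insert x PySem.Dict.empty) PySem.Dict.empty with hS
  have hSkeys : S.keys = PySem.Set.ofList l := pvSeed_keys l
  have hSnodup : S.keys.Nodup := by rw [hSkeys]; exact PySem.Set.nodup_ofList l
  have hSg : ∀ c, S.getD c PySem.Dict.empty = PySem.Dict.empty := fun c => pvSeed_getD l c
  -- keys of both results are the seeded key list
  have hfstP : ∀ y ∈ P.map (fun p : String × String => p.1), y ∈ PySem.Set.ofList l := by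
    intro y hy
    rcases List.mem_map.mp hy with ⟨⟨a, b⟩, hp, rfl⟩
    exact (PySem.Set.mem_ofList l a).mpr (List.of_mem_zip hp).1
  have hfstI : ∀ y ∈ (PySem.Dict.counter P).items.map (fun it => it.1.1), y ∈ PySem.Set.ofList l := by
    intro y hy
    rcases List.mem_map.mp hy with ⟨it, hit, rfl⟩
    rw [PySem.Dict.items_counter] at hit
    rcases List.mem_map.mp hit with ⟨⟨a, b⟩, hp, rfl⟩
    have : (a, b) ∈ P := (PySem.Set.mem_ofList P _).mp hp
    exact (PySem.Set.mem_ofList l a).mpr (List.of_mem_zip this).1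
  have hkeysA : (P.foldl
      (fun d p => d.modify p.1 PySem.Dict.empty (fun inn => pvCounterStep inn p.2)) S).keys
      = PySem.Set.ofList l := by
    have h : (P.foldl
        (fun d p => d.modify p.1 PySem.Dict.empty (fun inn => pvCounterStep inn p.2)) S).keys
        = PySem.Set.update S.keys (P.map (fun p : String × String => p.1)) :=
      PySem.Dict.keys_foldl_modify_key P (fun p : String × String => p.1) PySem.Dict.empty
        (fun _ p inn => pvCounterStep inn p.2) S
    rw [h, hSkeys, pvUpdate_of_subset _ _ hfstP]
  have hkeysB : ((PySem.Dict.counter P).items.foldl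
      (fun d it => d.modify it.1.1 PySem.Dict.empty (fun inn => inn.insert it.1.2 it.2)) S).keys
      = PySem.Set.ofList l := by
    have h : ((PySem.Dict.counter P).items.foldl
        (fun d it => d.modify it.1.1 PySem.Dict.empty (fun inn => inn.insert it.1.2 it.2)) S).keys
        = PySem.Set.update S.keys ((PySem.Dict.counter P).items.map (fun it => it.1.1)) :=
      PySem.Dict.keys_foldl_modify_key _ (fun it : (String × String) × Int => it.1.1) PySem.Dict.empty
        (fun _ (it : (String × String) × Int) inn => inn.insert it.1.2 it.2) S
    rw [h, hSkeys, pvUpdate_of_subset _ _ hfstI]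
  -- both results agree key by key: each inner dict is the counter of the seconds after that key
  have hgA : ∀ c, (P.foldl
      (fun d p => d.modify p.1 PySem.Dict.empty (fun inn => pvCounterStep inn p.2)) S).getD c PySem.Dict.empty
      = PySem.Dict.counter ((P.filter (fun p => p.1 == c)).map (·.2)) := by
    intro c
    have h : (P.foldl
        (fun d p => d.modify p.1 PySem.Dict.empty (fun inn => pvCounterStep inn p.2)) S).getD c PySem.Dict.empty
        = (P.filter (fun p => p.1 == c)).foldl (fun inn p => pvCounterStep inn p.2)
            (S.getD c PySem.Dict.empty) :=
      pvGetD_foldl_modify P (fun p => p.1) (fun p inn => pvCounterStep inn p.2) S c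
    rw [h, hSg, ← List.foldl_map (f := fun p : String × String => p.2) (g := pvCounterStep)]
    exact PySem.Dict.foldl_insert_getD_add_one_eq_counter _
  have hgB : ∀ c, ((PySem.Dict.counter P).items.foldl
      (fun d it => d.modify it.1.1 PySem.Dict.empty (fun inn => inn.insert it.1.2 it.2)) S).getD c PySem.Dict.empty
      = PySem.Dict.counter ((P.filter (fun p => p.1 == c)).map (·.2)) := by
    intro c
    have h : ((PySem.Dict.counter P).items.foldl
        (fun d it => d.modify it.1.1 PySem.Dict.empty (fun inn => inn.insert it.1.2 it.2)) S).getD c PySem.Dict.empty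
        = ((PySem.Dict.counter P).items.filter (fun it => it.1.1 == c)).foldl
            (fun inn it => inn.insert it.1.2 it.2) (S.getD c PySem.Dict.empty) :=
      pvGetD_foldl_modify _ (fun it : (String × String) × Int => it.1.1) (fun (it : (String × String) × Int) inn => inn.insert it.1.2 it.2) S c
    rw [h, hSg, pvInnerEq]
  -- hence the dicts coincide
  apply PySem.Dict.ext
  rw [PySem.Dict.items_eq_map_keys _ (by rw [hkeysA]; exact PySem.Set.nodup_ofList l) PySem.Dict.empty,
      PySem.Dict.items_eq_map_keys _ (by rw [hkeysB]; exact PySem.Set.nodup_ofList l) PySem.Dict.empty,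
      hkeysA, hkeysB]
  exact List.map_congr_left (fun c _ => by rw [hgA c, hgB c])

theorem pvMain (l : List String) : generate_occurence_matrix l = generate_occurence_matrix_alt l := by
  cases l with
  | nil => rfl
  | cons x xs =>
    simp only [generate_occurence_matrix, generate_occurence_matrix_alt]
    rw [PySem.List.slice_from _ (by norm_num : (0:Int) ≤ 1)]
    set l : List String := x :: xs with hl
    simp only [show (1:Int).toNat = 1 from rfl]
    have hcast : ((l.length : Int) - 1) = ((xs.length : Nat) : Int) := by
      simp [hl]
    set S : PySem.Dict String (PySem.Dict String Int) :=
      l.foldl (fun d x => d.insert x PySem.Dict.empty) PySem.Dict.empty with hS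
    have hA : (PySem.List.pyRange 0 ((l.length : Int) - 1)).foldl
        (fun d i =>
          if (d.getD (PySem.List.pyGetD l i "") PySem.Dict.empty).contains
               (PySem.List.pyGetD l (i + 1) "") then
            d.modify (PySem.List.pyGetD l i "") PySem.Dict.empty
              (fun inn => inn.insert (PySem.List.pyGetD l (i + 1) "")
                (inn.getD (PySem.List.pyGetD l (i + 1) "") 0 + 1))
          else
            d.modify (PySem.List.pyGetD l i "") PySem.Dict.empty
              (fun inn => inn.insert (PySem.List.pyGetD l (i + 1) "") 1)) S
        = (l.zip (l.drop 1)).foldl (fun d p => d.modify p.1 PySem.Dict.empty (fun inn => pvCounterStep inn p.2)) S := by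
      rw [hcast, PySem.List.pyRange_zero_natCast, List.foldl_map]
      have hxs : xs.length = l.length - 1 := by simp [hl]
      rw [hxs, ← pvRange_pairs l, List.foldl_map]
      apply List.foldl_ext
      intro d k _
      have h1 : PySem.List.pyGetD l (↑k) "" = l.getD k "" := PySem.List.pyGetD_natCast l k ""
      have h2 : PySem.List.pyGetD l ((↑k) + 1) "" = l.getD (k + 1) "" := by
        rw [show ((k : Int) + 1) = ((k + 1 : Nat) : Int) by push_cast; ring]
        exact PySem.List.pyGetD_natCast l (k + 1) ""
      rw [h1, h2, pvBranchMerge]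
    rw [hA, PySem.Dict.foldl_insert_getD_add_one_eq_counter, pvOuterEq l]

-- ===== VERDICT (by name: the statement is the Claim_ definition above) =====
theorem generate_occurence_matrix_spec : Claim_equal_generate_occurence_matrix := by
  intro list_of_letter _
  unfold Spec_generate_occurence_matrix
  exact pvMain list_of_letter
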